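-- pv_equiv track=rewrite | github.com/kryptobaseddev/cleo | packages/ct-skills/skills/ct-grade/scripts/token_tracker.py | _build_by_domain
-- ===== SOURCE A (Python) =====
-- OP_TOKEN_AVERAGES = {
--     "tasks.find": 750,
--     "tasks.list": 3000,
--     "tasks.show": 600,
--     "tasks.exists": 300,
--     "tasks.tree": 800,
--     "tasks.plan": 900,
--     "session.status": 350,
--     "session.list": 400,
--     "session.briefing.show": 500,
--     "admin.dash": 500,
--     "admin.help": 800,
--     "admin.health": 300,
--     "admin.stats": 600,
--     "memory.find": 600,
--     "memory.timeline": 500,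
--     "tools.skill.list": 400,
--     "tools.skill.show": 350,
--     "default": 400,
-- }
--
-- def _build_by_domain(ops: list[dict]) -> dict[str, dict]:
--     """Aggregate estimated tokens and op count by domain."""
--     by_domain: dict[str, dict] = {}
--     for op in ops:
--         domain = op.get("domain", "unknown")
--         key = f"{domain}.{op.get('operation', '')}"
--         avg = OP_TOKEN_AVERAGES.get(key, OP_TOKEN_AVERAGES["default"])
--         if domain not in by_domain:
--             by_domain[domain] = {"estimated_tokens": 0, "ops_count": 0}
--         by_domain[domain]["estimated_tokens"] += avg
--         by_domain[domain]["ops_count"] += 1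
--     return by_domain
-- ===== SOURCE B (Python) =====
-- OP_TOKEN_AVERAGES = {
--     "tasks.find": 750,
--     "tasks.list": 3000,
--     "tasks.show": 600,
--     "tasks.exists": 300,
--     "tasks.tree": 800,
--     "tasks.plan": 900,
--     "session.status": 350,
--     "session.list": 400,
--     "session.briefing.show": 500,
--     "admin.dash": 500,
--     "admin.help": 800,
--     "admin.health": 300,
--     "admin.stats": 600,
--     "memory.find": 600,
--     "memory.timeline": 500,
--     "tools.skill.list": 400,
--     "tools.skill.show": 350,
--     "default": 400,
-- }
--
-- def _build_by_domain(ops: list[dict]) -> dict[str, dict]: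
--     """Aggregate estimated tokens and op count by domain (two per-domain tables, then merge)."""
--     domains = [op.get("domain", "unknown") for op in ops]
--     tokens: dict[str, int] = {}
--     for op, domain in zip(ops, domains):
--         key = f"{domain}.{op.get('operation', '')}"
--         tokens[domain] = tokens.get(domain, 0) + OP_TOKEN_AVERAGES.get(key, OP_TOKEN_AVERAGES["default"])
--     counts: dict[str, int] = {}
--     for domain in domains:
--         counts[domain] = counts.get(domain, 0) + 1
--     return {d: {"estimated_tokens": t, "ops_count": counts[d]} for d, t in tokens.items()}
-- ===== Notes on version B (the rewrite author's own statement) =====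
-- stated objective: alternative
-- what changed: Instead of one loop that creates and mutates a nested per-domain dict in place, B accumulates two flat per-domain tables (summed token averages and op counts) in separate passes and merges them into the nested result with a final comprehension.
import Mathlib
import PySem

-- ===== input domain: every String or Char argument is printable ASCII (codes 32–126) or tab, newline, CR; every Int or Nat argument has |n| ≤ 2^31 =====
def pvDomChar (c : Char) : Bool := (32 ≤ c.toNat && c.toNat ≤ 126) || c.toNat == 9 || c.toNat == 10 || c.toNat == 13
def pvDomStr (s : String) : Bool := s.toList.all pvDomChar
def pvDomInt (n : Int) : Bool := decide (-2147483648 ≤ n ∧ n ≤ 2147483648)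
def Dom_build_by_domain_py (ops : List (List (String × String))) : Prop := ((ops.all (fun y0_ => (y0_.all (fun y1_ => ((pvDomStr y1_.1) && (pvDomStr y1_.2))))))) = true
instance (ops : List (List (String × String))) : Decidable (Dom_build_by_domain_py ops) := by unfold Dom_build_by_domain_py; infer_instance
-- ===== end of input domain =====

-- B replaces A's single loop mutating a nested per-domain dict by two flat per-domain
-- tables (token sums and op counts) merged at the end; alternative decomposition, same cost.

-- ===== PORT A =====
-- op.get(k, dflt) on a dict parameter (assoc list, first match)
def pyDictGetS (d : List (String × String)) (k dflt : String) : String :=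
  match d.find? (fun p => p.1 == k) with
  | some p => p.2
  | none => dflt

-- the module constant OP_TOKEN_AVERAGES
def opTokenAverages : List (String × Int) :=
  [("tasks.find", 750), ("tasks.list", 3000), ("tasks.show", 600), ("tasks.exists", 300),
   ("tasks.tree", 800), ("tasks.plan", 900), ("session.status", 350), ("session.list", 400),
   ("session.briefing.show", 500), ("admin.dash", 500), ("admin.help", 800),
   ("admin.health", 300), ("admin.stats", 600), ("memory.find", 600), ("memory.timeline", 500),
   ("tools.skill.list", 400), ("tools.skill.show", 350), ("default", 400)]

-- OP_TOKEN_AVERAGES.get(key, dflt); "default" is present, so the [] access is this with any dflt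
def opAvgGetD (key : String) (dflt : Int) : Int :=
  match opTokenAverages.find? (fun p => p.1 == key) with
  | some p => p.2
  | none => dflt

def build_by_domain_py (ops : List (List (String × String))) : List (String × List (String × Int)) :=
  let by_domain : PySem.Dict String (PySem.Dict String Int) :=
    ops.foldl (fun by_domain op =>
      let domain := pyDictGetS op "domain" "unknown"
      let key := PySem.Str.join "" [domain, ".", pyDictGetS op "operation" ""]
      let avg := opAvgGetD key (opAvgGetD "default" 0)
      let by_domain :=
        if by_domain.contains domain then by_domain
        else by_domain.insert domain (PySem.Dict.ofList [("estimated_tokens", 0), ("ops_count", 0)])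
      -- by_domain[domain]["estimated_tokens"] += avg  (key is present, so getD with dflt is exact)
      let by_domain := by_domain.modify domain PySem.Dict.empty
        (fun inner => inner.modify "estimated_tokens" 0 (· + avg))
      by_domain.modify domain PySem.Dict.empty
        (fun inner => inner.modify "ops_count" 0 (· + 1)))
      PySem.Dict.empty
  by_domain.items.map (fun p => (p.1, p.2.items))

-- ===== PORT B =====
def build_by_domain_py_alt (ops : List (List (String × String))) : List (String × List (String × Int)) :=
  let domains := ops.map (fun op => pyDictGetS op "domain" "unknown")
  let tokens : PySem.Dict String Int :=
    (ops.zip domains).foldl (fun tokens p =>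
      let key := PySem.Str.join "" [p.2, ".", pyDictGetS p.1 "operation" ""]
      tokens.insert p.2 (tokens.getD p.2 0 + opAvgGetD key (opAvgGetD "default" 0)))
      PySem.Dict.empty
  let counts : PySem.Dict String Int :=
    domains.foldl (fun counts d => counts.insert d (counts.getD d 0 + 1)) PySem.Dict.empty
  -- the dict comprehension iterates tokens' (distinct) keys in order: its items are this map
  tokens.items.map (fun p => (p.1, [("estimated_tokens", p.2), ("ops_count", counts.getD p.1 0)]))

-- ===== PRECONDITION & SPEC =====
def Spec_build_by_domain_py (ops : List (List (String × String))) (out : List (String × List (String × Int))) : Prop := out = build_by_domain_py_alt ops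
instance (ops : List (List (String × String))) (out : List (String × List (String × Int))) : Decidable (Spec_build_by_domain_py ops out) := by unfold Spec_build_by_domain_py; infer_instance

-- ===== CLAIM (what is proved, stated in full; the proofs are below) =====
def Claim_equal_build_by_domain_py : Prop := ∀ (ops : List (List (String × String))), Dom_build_by_domain_py ops → Spec_build_by_domain_py ops (build_by_domain_py ops)

-- ===== LEMMAS AND PROOFS =====
def domOf (op : List (String × String)) : String := pyDictGetS op "domain" "unknown"

def avgOf (op : List (String × String)) : Int :=
  opAvgGetD (PySem.Str.join "" [domOf op, ".", pyDictGetS op "operation" ""]) (opAvgGetD "default" 0)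

def stepA (d : PySem.Dict String (PySem.Dict String Int)) (op : List (String × String)) :
    PySem.Dict String (PySem.Dict String Int) :=
  let d' :=
    if d.contains (domOf op) then d
    else d.insert (domOf op) (PySem.Dict.ofList [("estimated_tokens", 0), ("ops_count", 0)])
  let d'' := d'.modify (domOf op) PySem.Dict.empty
    (fun inner => inner.modify "estimated_tokens" 0 (· + avgOf op))
  d''.modify (domOf op) PySem.Dict.empty
    (fun inner => inner.modify "ops_count" 0 (· + 1))

def stepT (t : PySem.Dict String Int) (op : List (String × String)) : PySem.Dict String Int :=
  t.insert (domOf op) (t.getD (domOf op) 0 + avgOf op)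

def stepC (c : PySem.Dict String Int) (op : List (String × String)) : PySem.Dict String Int :=
  c.insert (domOf op) (c.getD (domOf op) 0 + 1)

def LoopInv (d : PySem.Dict String (PySem.Dict String Int)) (t c : PySem.Dict String Int) : Prop :=
  d.keys = t.keys ∧ t.keys = c.keys ∧ d.keys.Nodup ∧
  ∀ k, k ∈ d.keys → d.getD k PySem.Dict.empty =
    PySem.Dict.mk [("estimated_tokens", t.getD k 0), ("ops_count", c.getD k 0)]


theorem inv_insert (d : PySem.Dict String (PySem.Dict String Int)) (t c : PySem.Dict String Int)
    (h : LoopInv d t c) (dom : String) (x y : Int) :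
    LoopInv (d.insert dom (PySem.Dict.mk [("estimated_tokens", x), ("ops_count", y)]))
      (t.insert dom x) (c.insert dom y) := by
  obtain ⟨hk1, hk2, hnd, hget⟩ := h
  have hct : t.contains dom = d.contains dom := by
    rw [PySem.Dict.contains_eq_decide_mem_keys, PySem.Dict.contains_eq_decide_mem_keys, hk1]
  have hcc : c.contains dom = d.contains dom := by
    rw [PySem.Dict.contains_eq_decide_mem_keys, PySem.Dict.contains_eq_decide_mem_keys, ← hk2, ← hk1]
  by_cases hc : d.contains dom = true
  · refine ⟨?_, ?_, ?_, ?_⟩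
    · rw [PySem.Dict.keys_insert_of_contains _ _ hc,
        PySem.Dict.keys_insert_of_contains _ _ (hct.trans hc), hk1]
    · rw [PySem.Dict.keys_insert_of_contains _ _ (hct.trans hc),
        PySem.Dict.keys_insert_of_contains _ _ (hcc.trans hc), hk2]
    · rw [PySem.Dict.keys_insert_of_contains _ _ hc]; exact hnd
    · intro k hk
      by_cases hkd : k = dom
      · subst hkd
        rw [PySem.Dict.getD_insert_self, PySem.Dict.getD_insert_self, PySem.Dict.getD_insert_self]
      · simp only [PySem.Dict.getD_insert, if_neg hkd]
        refine hget k ?_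
        rcases (PySem.Dict.mem_keys_insert d dom k _).mp hk with h' | h'
        · exact absurd h' hkd
        · exact h'
  · have hc' : d.contains dom = false := by simpa using hc
    refine ⟨?_, ?_, ?_, ?_⟩
    · rw [PySem.Dict.keys_insert_of_not_contains _ _ hc',
        PySem.Dict.keys_insert_of_not_contains _ _ (hct.trans hc'), hk1]
    · rw [PySem.Dict.keys_insert_of_not_contains _ _ (hct.trans hc'),
        PySem.Dict.keys_insert_of_not_contains _ _ (hcc.trans hc'), hk2]
    · rw [PySem.Dict.keys_insert_of_not_contains _ _ hc']
      refine List.Nodup.append hnd (List.nodup_singleton dom) ?_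
      intro a ha hb
      rw [List.mem_singleton] at hb; subst hb
      exact hc ((PySem.Dict.contains_iff_mem_keys d a).mpr ha)
    · intro k hk
      by_cases hkd : k = dom
      · subst hkd
        rw [PySem.Dict.getD_insert_self, PySem.Dict.getD_insert_self, PySem.Dict.getD_insert_self]
      · simp only [PySem.Dict.getD_insert, if_neg hkd]
        refine hget k ?_
        rcases (PySem.Dict.mem_keys_insert d dom k _).mp hk with h' | h'
        · exact absurd h' hkd
        · exact h'

theorem inv_step (d : PySem.Dict String (PySem.Dict String Int)) (t c : PySem.Dict String Int)
    (op : List (String × String)) (h : LoopInv d t c) :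
    LoopInv (stepA d op) (stepT t op) (stepC c op) := by
  obtain ⟨hk1, hk2, hnd, hget⟩ := h
  have hct : t.contains (domOf op) = d.contains (domOf op) := by
    rw [PySem.Dict.contains_eq_decide_mem_keys, PySem.Dict.contains_eq_decide_mem_keys, hk1]
  by_cases hc : d.contains (domOf op) = true
  · have hmem : domOf op ∈ d.keys := (PySem.Dict.contains_iff_mem_keys d _).mp hc
    have hstepA : stepA d op =
        d.insert (domOf op)
          (PySem.Dict.mk [("estimated_tokens", t.getD (domOf op) 0 + avgOf op),
                          ("ops_count", c.getD (domOf op) 0 + 1)]) := by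
      unfold stepA
      simp only [hc, if_true, PySem.Dict.modify, PySem.Dict.getD_insert_self,
        PySem.Dict.insert_insert_self]
      rw [hget _ hmem]
      rfl
    rw [hstepA]
    exact inv_insert d t c ⟨hk1, hk2, hnd, hget⟩ (domOf op) _ _
  · have hc' : d.contains (domOf op) = false := by simpa using hc
    have ht0 : t.getD (domOf op) 0 = 0 := PySem.Dict.getD_of_not_contains t _ (hct.trans hc')
    have hcc : c.contains (domOf op) = d.contains (domOf op) := by
      rw [PySem.Dict.contains_eq_decide_mem_keys, PySem.Dict.contains_eq_decide_mem_keys, ← hk2, ← hk1]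
    have hc0 : c.getD (domOf op) 0 = 0 := PySem.Dict.getD_of_not_contains c _ (hcc.trans hc')
    have hstepA : stepA d op =
        d.insert (domOf op)
          (PySem.Dict.mk [("estimated_tokens", t.getD (domOf op) 0 + avgOf op),
                          ("ops_count", c.getD (domOf op) 0 + 1)]) := by
      unfold stepA
      simp only [hc', if_false, Bool.false_eq_true, PySem.Dict.modify,
        PySem.Dict.getD_insert_self, PySem.Dict.insert_insert_self]
      rw [ht0, hc0]
      rfl
    rw [hstepA]
    exact inv_insert d t c ⟨hk1, hk2, hnd, hget⟩ (domOf op) _ _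

theorem inv_fold (ops : List (List (String × String))) :
    LoopInv (ops.foldl stepA PySem.Dict.empty) (ops.foldl stepT PySem.Dict.empty)
      (ops.foldl stepC PySem.Dict.empty) := by
  induction ops using List.reverseRecOn with
  | nil =>
    refine ⟨rfl, rfl, ?_, ?_⟩
    · simp [PySem.Dict.keys_empty]
    · intro k hk; simp [PySem.Dict.keys_empty] at hk
  | append_singleton l op ih =>
    simp only [List.foldl_append, List.foldl_cons, List.foldl_nil]
    exact inv_step _ _ _ op ih

theorem A_eq_fold (ops : List (List (String × String))) :
    build_by_domain_py ops =
      (ops.foldl stepA PySem.Dict.empty).items.map (fun p => (p.1, p.2.items)) := rfl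

theorem B_eq_fold (ops : List (List (String × String))) :
    build_by_domain_py_alt ops =
      (ops.foldl stepT PySem.Dict.empty).items.map
        (fun p => (p.1, [("estimated_tokens", p.2),
                         ("ops_count", (ops.foldl stepC PySem.Dict.empty).getD p.1 0)])) := by
  have hz := @List.zip_map' _ _ _ id (fun op => pyDictGetS op "domain" "unknown") ops
  simp only [List.map_id, id] at hz
  simp only [build_by_domain_py_alt, hz, List.foldl_map]
  rfl

-- ===== VERDICT (by name: the statement is the Claim_ definition above) =====
theorem build_by_domain_py_spec : Claim_equal_build_by_domain_py := by
  intro ops _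
  unfold Spec_build_by_domain_py
  rw [A_eq_fold, B_eq_fold]
  obtain ⟨hk1, hk2, hnd, hget⟩ := inv_fold ops
  have hndt : (ops.foldl stepT PySem.Dict.empty).keys.Nodup := hk1 ▸ hnd
  rw [PySem.Dict.items_eq_map_keys _ hnd PySem.Dict.empty,
    PySem.Dict.items_eq_map_keys _ hndt 0, List.map_map, List.map_map, ← hk1]
  refine List.map_congr_left ?_
  intro k hkmem
  simp only [Function.comp]
  rw [hget k hkmem]
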